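-- pv_equiv track=rewrite | github.com/drivet/yawt | yawtext/breadcrumbs.py | _breadcrumbs
-- ===== SOURCE A (Python) =====
-- def _breadcrumbs(path):
--     if path.startswith('/'):
--         path = path[1:]
--
--     pathurl = ''
--     breadcrumbs = []
--     for piece in path.split('/'):
--         pathurl += '/' + piece
--         breadcrumbs.append({'crumb': piece, 'url': pathurl})
--     return breadcrumbs
-- ===== SOURCE B (Python) =====
-- def _breadcrumbs(path):
--     if path.startswith('/'):
--         path = path[1:]
--     pieces = path.split('/')
--     return [{'crumb': p, 'url': '/' + '/'.join(pieces[:i + 1])}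
--             for i, p in enumerate(pieces)]
-- ===== Notes on version B (the rewrite author's own statement) =====
-- stated objective: simpler
-- what changed: Replaces the loop that threads a running pathurl accumulator and mutates a result list with a single comprehension over enumerate(pieces) in which each crumb rebuilds its own URL as '/' + '/'.join(pieces[:i+1]); no intermediate state is maintained.
import Mathlib
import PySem

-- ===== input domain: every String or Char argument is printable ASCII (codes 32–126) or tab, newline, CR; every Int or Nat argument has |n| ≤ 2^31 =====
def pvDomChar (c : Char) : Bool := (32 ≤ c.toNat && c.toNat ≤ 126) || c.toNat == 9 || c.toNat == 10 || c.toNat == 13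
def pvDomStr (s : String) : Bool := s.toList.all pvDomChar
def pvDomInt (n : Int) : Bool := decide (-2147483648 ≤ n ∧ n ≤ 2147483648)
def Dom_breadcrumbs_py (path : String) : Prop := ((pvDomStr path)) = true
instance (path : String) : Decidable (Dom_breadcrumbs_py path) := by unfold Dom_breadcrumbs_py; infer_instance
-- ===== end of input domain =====

-- B replaces A's running-pathurl accumulator loop with a map over enumerate(pieces)
-- where each crumb rebuilds its own URL from the prefix pieces[:i+1] (simpler decomposition, not faster).

-- ===== PORT A =====
-- A's loop body: pathurl += '/' + piece; breadcrumbs.append({'crumb': piece, 'url': pathurl})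
def bcStep (st : String × List (List (String × String))) (piece : String) :
    String × List (List (String × String)) :=
  let pathurl := PySem.Str.join "" [st.1, "/", piece]
  (pathurl, st.2 ++ [[("crumb", piece), ("url", pathurl)]])

def breadcrumbs_py (path : String) : List (List (String × String)) :=
  let path1 := if PySem.Str.startswith path "/" then PySem.Str.slice path (some 1) none else path
  -- path1.split('/'): the separator is nonempty, so split? is always some
  (((PySem.Str.split? path1 "/").getD []).foldl bcStep ("", [])).2

-- ===== PORT B =====
-- B's comprehension element: {'crumb': p, 'url': '/' + '/'.join(pieces[:i+1])}
def bcCrumb (pieces : List String) (ip : Int × String) : List (String × String) :=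
  [("crumb", ip.2),
   ("url", PySem.Str.join "" ["/", PySem.Str.join "/" (PySem.List.slice pieces none (some (ip.1 + 1)))])]

def breadcrumbs_py_alt (path : String) : List (List (String × String)) :=
  let path1 := if PySem.Str.startswith path "/" then PySem.Str.slice path (some 1) none else path
  let pieces := (PySem.Str.split? path1 "/").getD []
  (PySem.List.enumerate pieces 0).map (bcCrumb pieces)

-- ===== PRECONDITION & SPEC =====
def Spec_breadcrumbs_py (path : String) (out : List (List (String × String))) : Prop := out = breadcrumbs_py_alt path
instance (path : String) (out : List (List (String × String))) : Decidable (Spec_breadcrumbs_py path out) := by unfold Spec_breadcrumbs_py; infer_instance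

-- ===== CLAIM (what is proved, stated in full; the proofs are below) =====
def Claim_equal_breadcrumbs_py : Prop := ∀ (path : String), Dom_breadcrumbs_py path → Spec_breadcrumbs_py path (breadcrumbs_py path)

-- ===== LEMMAS AND PROOFS =====

-- joining with the empty separator concatenates the parts (two- and three-part forms)
theorem join2c (a b : List Char) : PySem.Chars.join [] [a, b] = a ++ b := by
  rw [PySem.Chars.join_cons_cons, PySem.Chars.join_singleton]; simp

theorem join3 (a b c : String) :
    (PySem.Str.join "" [a, b, c]).toList = a.toList ++ b.toList ++ c.toList := by
  rw [PySem.Str.toList_join]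
  simp [PySem.Chars.join_cons_cons, PySem.Chars.join_singleton]

-- '/' + '/'.join(ps) for nonempty ps is the flat concatenation of '/'+piece blocks
theorem slash_join (x : String) (ps : List String) :
    '/' :: PySem.Chars.join ['/'] ((x :: ps).map String.toList)
      = (x :: ps).flatMap (fun s => '/' :: s.toList) := by
  induction ps generalizing x with
  | nil => simp [PySem.Chars.join_singleton]
  | cons y t ih =>
    rw [List.map_cons, List.map_cons, PySem.Chars.join_cons_cons]
    have := ih y
    simp only [List.flatMap_cons] at this ⊢
    simp only [List.map_cons] at this
    rw [← this]
    simp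

-- B's crumb at index pre.length of the list pre ++ x :: t, written in A's shape
theorem bcCrumb_toList (pre : List String) (x : String) (t : List String) :
    bcCrumb (pre ++ x :: t) ((pre.length : Int), x)
      = [("crumb", x),
         ("url", PySem.Str.join ""
           [String.ofList (pre.flatMap (fun s => '/' :: s.toList)), "/", x])] := by
  unfold bcCrumb
  simp only [List.cons.injEq, Prod.mk.injEq, and_true, true_and]
  rw [← String.toList_inj, join3, PySem.Str.toList_join]
  have hslice : PySem.List.slice (pre ++ x :: t) none (some ((pre.length : Int) + 1))
      = pre ++ [x] := by
    have h1 : ((pre.length : Int) + 1) = ((pre.length + 1 : Nat) : Int) := by push_cast; ring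
    rw [h1, PySem.List.slice_to_natCast]
    have h2 : pre ++ x :: t = (pre ++ [x]) ++ t := by simp
    rw [h2]
    have h3 : ((pre ++ [x]) ++ t).take (pre ++ [x]).length = pre ++ [x] := List.take_left
    simpa using h3
  rw [hslice]
  simp only [List.map_cons, List.map_nil]
  have hsep : ("" : String).toList = [] := rfl
  have hsl : ("/" : String).toList = ['/'] := rfl
  rw [hsep, hsl, join2c, PySem.Str.toList_join, hsl, String.toList_ofList]
  -- goal: ['/'] ++ Chars.join ['/'] ((pre ++ [x]).map toList) = flatMap pre ++ ['/'] ++ x.toList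
  cases pre with
  | nil =>
    simp [PySem.Chars.join_singleton]
  | cons p ps =>
    have h := slash_join p (ps ++ [x])
    calc ['/'] ++ PySem.Chars.join ['/'] (((p :: ps) ++ [x]).map String.toList)
        = '/' :: PySem.Chars.join ['/'] ((p :: (ps ++ [x])).map String.toList) := by simp
      _ = (p :: (ps ++ [x])).flatMap (fun s => '/' :: s.toList) := h
      _ = (p :: ps).flatMap (fun s => '/' :: s.toList) ++ ['/'] ++ x.toList := by simp
  
-- loop invariant: after consuming the prefix `pre`, A's accumulator string is the
-- concatenation of '/'+piece over pre, and the remaining fold emits exactly B's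
-- crumbs for the remaining enumerated pieces.
theorem loop_eq (xs : List String) : ∀ (pre : List String) (acc : String)
    (out : List (List (String × String))),
    acc.toList = pre.flatMap (fun s => '/' :: s.toList) →
    (xs.foldl bcStep (acc, out)).2
      = out ++ (PySem.List.enumerate xs (pre.length : Int)).map (bcCrumb (pre ++ xs)) := by
  induction xs with
  | nil => intro pre acc out _; simp [PySem.List.enumerate]
  | cons x t ih =>
    intro pre acc out hacc
    rw [List.foldl_cons, PySem.List.enumerate_cons]
    have hstep : bcStep (acc, out) x
        = (PySem.Str.join "" [acc, "/", x],
           out ++ [[("crumb", x), ("url", PySem.Str.join "" [acc, "/", x])]]) := by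
      simp [bcStep]
    rw [hstep]
    have hacc' : (PySem.Str.join "" [acc, "/", x]).toList
        = (pre ++ [x]).flatMap (fun s => '/' :: s.toList) := by
      rw [join3, hacc]; simp
    have hrec := ih (pre ++ [x]) (PySem.Str.join "" [acc, "/", x])
      (out ++ [[("crumb", x), ("url", PySem.Str.join "" [acc, "/", x])]]) hacc'
    rw [hrec]
    have hlen : ((pre ++ [x]).length : Int) = (pre.length : Int) + 1 := by simp
    rw [hlen]
    have hassoc : (pre ++ [x]) ++ t = pre ++ x :: t := by simp
    rw [hassoc, List.map_cons]
    have hb := bcCrumb_toList pre x t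
    have haccs : acc = String.ofList (pre.flatMap (fun s => '/' :: s.toList)) :=
      String.toList_inj.mp (by rw [String.toList_ofList]; exact hacc)
    rw [hb, ← haccs]
    simp

-- ===== VERDICT (by name: the statement is the Claim_ definition above) =====
theorem breadcrumbs_py_spec : Claim_equal_breadcrumbs_py := by
  intro path _
  unfold Spec_breadcrumbs_py breadcrumbs_py breadcrumbs_py_alt
  have h := loop_eq (((PySem.Str.split?
      (if PySem.Str.startswith path "/" then PySem.Str.slice path (some 1) none else path)
      "/").getD [])) [] "" [] (by simp)
  simpa using h
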